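-- pv_equiv track=rewrite | github.com/Cinder871169/Python | PY01019.py | check
-- ===== SOURCE A (Python) =====
-- def check(s):
--     a = ""
--     for pos in s:
--         a = pos + a
--     for i in range(1, len(s)):
--         if abs(ord(s[i]) - ord(s[i - 1])) != abs(ord(a[i]) - ord(a[i - 1])):
--             return False
--     return True
-- ===== SOURCE B (Python) =====
-- def check(s):
--     d = [abs(ord(x) - ord(y)) for x, y in zip(s, s[1:])]
--     return d == d[::-1]
-- ===== Notes on version B (the rewrite author's own statement) =====
-- stated objective: simpler
-- what changed: Instead of building the reversed string and comparing adjacent ord-differences index by index against it, B computes the list of adjacent absolute ord-differences once and returns whether that list is a palindrome (d == d[::-1]).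
import Mathlib
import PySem

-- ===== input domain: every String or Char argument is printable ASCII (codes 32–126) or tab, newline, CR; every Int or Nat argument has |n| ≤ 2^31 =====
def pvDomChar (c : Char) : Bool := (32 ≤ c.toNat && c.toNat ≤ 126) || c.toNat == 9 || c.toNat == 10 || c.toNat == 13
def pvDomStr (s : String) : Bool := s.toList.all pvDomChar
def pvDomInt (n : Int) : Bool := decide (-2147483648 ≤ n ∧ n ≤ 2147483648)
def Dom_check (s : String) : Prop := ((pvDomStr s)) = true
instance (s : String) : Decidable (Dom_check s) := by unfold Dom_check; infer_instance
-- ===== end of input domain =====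

-- B replaces A's "build the reversed string, then compare adjacent ord-differences index by
-- index against it" by "the adjacent absolute ord-difference list is a palindrome".

-- ===== PORT A =====
-- ord(x[i]) for an in-range index (the loop only produces in-range indices, so the default is never used)
def pvOrdAt (l : List Char) (i : Int) : Int := ((PySem.List.pyGetD l i ' ').toNat : Int)

def check (s : String) : Bool :=
  let l := s.toList
  -- a = ""; for pos in s: a = pos + a
  let a := l.foldl (fun acc c => c :: acc) ([] : List Char)
  -- for i in range(1, len(s)): if … != … : return False; return True
  (PySem.List.pyRange 1 (PySem.List.len l) 1).all fun i =>
    (pvOrdAt l i - pvOrdAt l (i - 1)).natAbs == (pvOrdAt a i - pvOrdAt a (i - 1)).natAbs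

-- ===== PORT B =====
def check_alt (s : String) : Bool :=
  let l := s.toList
  -- d = [abs(ord(x) - ord(y)) for x, y in zip(s, s[1:])]
  let d := (l.zip l.tail).map (fun p => ((p.1.toNat : Int) - (p.2.toNat : Int)).natAbs)
  -- return d == d[::-1]
  d == d.reverse

-- ===== PRECONDITION & SPEC =====
def Spec_check (s : String) (out : Bool) : Prop := out = check_alt s
instance (s : String) (out : Bool) : Decidable (Spec_check s out) := by unfold Spec_check; infer_instance

-- ===== CLAIM (what is proved, stated in full; the proofs are below) =====
def Claim_equal_check : Prop := ∀ (s : String), Dom_check s → Spec_check s (check s)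

-- ===== LEMMAS AND PROOFS =====

-- value of the j-th character, total form
def gAt (l : List Char) (j : Nat) : Int := ((l.getD j ' ').toNat : Int)

-- the common predicate both programs decide
def Pal (l : List Char) : Prop :=
  ∀ j : Nat, j + 1 < l.length →
    (gAt l j - gAt l (j + 1)).natAbs =
    (gAt l (l.length - 2 - j) - gAt l (l.length - 1 - j)).natAbs

lemma foldl_cons_rev (l acc : List Char) :
    List.foldl (fun acc c => c :: acc) acc l = l.reverse ++ acc := by
  induction l generalizing acc with
  | nil => simp
  | cons x xs ih => simp [List.foldl, ih]

lemma pvOrdAt_natCast (l : List Char) (k : Nat) : pvOrdAt l (k : Int) = gAt l k := by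
  simp [pvOrdAt, gAt]

lemma gAt_reverse (l : List Char) (k : Nat) (h : k < l.length) :
    gAt l.reverse k = gAt l (l.length - 1 - k) := by
  unfold gAt
  rw [List.getD_eq_getElem _ _ (by simpa using h), List.getD_eq_getElem _ _ (by omega),
    List.getElem_reverse]

lemma natAbs_sub_comm' (a b : Int) : (a - b).natAbs = (b - a).natAbs := by omega

lemma keyA (s : String) : check s = true ↔ Pal s.toList := by
  unfold check
  dsimp only
  rw [foldl_cons_rev]
  simp only [List.append_nil, PySem.List.len_eq, List.all_eq_true,
    PySem.List.mem_pyRange_one, beq_iff_eq]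
  constructor
  · intro H j hj
    have h1 : (1 : Int) ≤ ((j + 1 : Nat) : Int) := by push_cast; omega
    have h2 : ((j + 1 : Nat) : Int) < s.toList.length := by push_cast; omega
    have := H ((j + 1 : Nat) : Int) ⟨h1, h2⟩
    have hsub : ((j + 1 : Nat) : Int) - 1 = ((j : Nat) : Int) := by push_cast; omega
    rw [hsub, pvOrdAt_natCast, pvOrdAt_natCast, pvOrdAt_natCast, pvOrdAt_natCast,
      gAt_reverse _ _ (by omega), gAt_reverse _ _ (by omega)] at this
    have e1 : s.toList.length - 1 - (j + 1) = s.toList.length - 2 - j := by omega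
    rw [e1] at this
    rw [natAbs_sub_comm' (gAt s.toList j)]
    exact this
  · intro H i hi
    obtain ⟨h1, h2⟩ := hi
    obtain ⟨j, rfl⟩ : ∃ j : Nat, i = ((j + 1 : Nat) : Int) :=
      ⟨i.toNat - 1, by omega⟩
    have hj : j + 1 < s.toList.length := by exact_mod_cast h2
    have hsub : ((j + 1 : Nat) : Int) - 1 = ((j : Nat) : Int) := by push_cast; omega
    rw [hsub, pvOrdAt_natCast, pvOrdAt_natCast, pvOrdAt_natCast, pvOrdAt_natCast,
      gAt_reverse _ _ (by omega), gAt_reverse _ _ (by omega)]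
    have e1 : s.toList.length - 1 - (j + 1) = s.toList.length - 2 - j := by omega
    rw [e1, natAbs_sub_comm' (gAt s.toList (j + 1))]
    exact H j hj

-- the diff list of B
def dList (l : List Char) : List Nat :=
  (l.zip l.tail).map (fun p => ((p.1.toNat : Int) - (p.2.toNat : Int)).natAbs)

lemma dList_length (l : List Char) : (dList l).length = l.length - 1 := by
  simp [dList]

lemma dList_getElem (l : List Char) (j : Nat) (h : j < (dList l).length) :
    (dList l)[j] = (gAt l j - gAt l (j + 1)).natAbs := by
  have hl : j + 1 < l.length := by rw [dList_length] at h; omega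
  simp only [dList, List.getElem_map, List.getElem_zip, List.getElem_tail]
  unfold gAt
  rw [List.getD_eq_getElem _ _ (by omega), List.getD_eq_getElem _ _ (by omega)]

lemma keyB (s : String) : check_alt s = true ↔ Pal s.toList := by
  unfold check_alt
  dsimp only
  simp only [beq_iff_eq]
  show dList s.toList = (dList s.toList).reverse ↔ _
  set l := s.toList with hl
  constructor
  · intro Hd j hj
    have hjd : j < (dList l).length := by rw [dList_length]; omega
    have hjd' : j < (dList l).reverse.length := by simpa using hjd
    have := (List.ext_get_iff.mp Hd).2 j hjd (by simpa using hjd)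
    rw [List.get_eq_getElem, List.get_eq_getElem, List.getElem_reverse] at this
    rw [dList_getElem _ _ hjd, dList_getElem] at this
    · have e : (dList l).length - 1 - j = l.length - 2 - j := by rw [dList_length]; omega
      rw [e] at this
      have e2 : l.length - 2 - j + 1 = l.length - 1 - j := by omega
      rw [e2] at this
      exact this
  · intro H
    apply List.ext_getElem (by simp)
    intro j hjd hjr
    rw [List.getElem_reverse, dList_getElem _ _ hjd, dList_getElem]
    · have hj : j + 1 < l.length := by rw [dList_length] at hjd; omega
      have e : (dList l).length - 1 - j = l.length - 2 - j := by rw [dList_length]; omega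
      rw [e]
      have e2 : l.length - 2 - j + 1 = l.length - 1 - j := by omega
      rw [e2]
      exact H j hj

-- ===== VERDICT (by name: the statement is the Claim_ definition above) =====
theorem check_spec : Claim_equal_check := by
  intro s _
  unfold Spec_check
  rw [Bool.eq_iff_iff, keyA, keyB]
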